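-- pv_equiv track=rewrite | github.com/NewcastleRSE/beein-human-transcription-checker | website/txt2tei/replace_md_tei.py | add_outer_tags
-- ===== SOURCE A (Python) =====
-- def add_outer_tags(converted_text, tei_tokenized):
--     outer_tags = {
--         '\r\n': '</p><p>',
--         '\n': '</p><p>',
--         '===': '<br/>',
--         '~~~': '<br/>[Ornament]<br/>'
--     }
--
--     outer_tags_tei = {
--         '\r\n': '</p><p>',
--         '\n': '</p><p>',
--         '===': '<pb/>',
--         '~~~': '<figure>[Ornament]<figure/>'
--     }
--     converted_text = [outer_tags[tag] if tag in outer_tags.keys() else tag for tag in converted_text]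
--     tei_tokenized = [outer_tags_tei[tag] if tag in outer_tags_tei.keys() else tag for tag in tei_tokenized]
--     # changes the first to just an open tag
--     for i, token in enumerate(converted_text):
--         if token == '</p><p>':
--             converted_text[i] = '<p>'
--             break
--
--     for i, token in enumerate(tei_tokenized):
--         if token == '</p><p>':
--             tei_tokenized[i] = '<p>'
--             break
--     return converted_text, tei_tokenized
-- ===== SOURCE B (Python) =====
-- def add_outer_tags(converted_text, tei_tokenized):
--     outer_tags = {
--         '\r\n': '</p><p>',
--         '\n': '</p><p>',
--         '===': '<br/>',
--         '~~~': '<br/>[Ornament]<br/>'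
--     }
--     outer_tags_tei = {
--         '\r\n': '</p><p>',
--         '\n': '</p><p>',
--         '===': '<pb/>',
--         '~~~': '<figure>[Ornament]<figure/>'
--     }
--
--     def convert(tokens, mapping):
--         # single stateful pass: map each token and turn the first '</p><p>'
--         # (post-mapping) into '<p>'
--         out = []
--         first_seen = False
--         for token in tokens:
--             mapped = mapping.get(token, token)
--             if mapped == '</p><p>' and not first_seen:
--                 mapped = '<p>'
--                 first_seen = True
--             out.append(mapped)
--         return out
--
--     return convert(converted_text, outer_tags), convert(tei_tokenized, outer_tags_tei)
-- ===== Notes on version B (the rewrite author's own statement) =====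
-- stated objective: simpler
-- what changed: Replaces A's two passes per list (a mapping comprehension followed by a find-first-and-replace loop) with one shared stateful helper that maps each token and rewrites the first post-mapping '</p><p>' in a single traversal.
import Mathlib
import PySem

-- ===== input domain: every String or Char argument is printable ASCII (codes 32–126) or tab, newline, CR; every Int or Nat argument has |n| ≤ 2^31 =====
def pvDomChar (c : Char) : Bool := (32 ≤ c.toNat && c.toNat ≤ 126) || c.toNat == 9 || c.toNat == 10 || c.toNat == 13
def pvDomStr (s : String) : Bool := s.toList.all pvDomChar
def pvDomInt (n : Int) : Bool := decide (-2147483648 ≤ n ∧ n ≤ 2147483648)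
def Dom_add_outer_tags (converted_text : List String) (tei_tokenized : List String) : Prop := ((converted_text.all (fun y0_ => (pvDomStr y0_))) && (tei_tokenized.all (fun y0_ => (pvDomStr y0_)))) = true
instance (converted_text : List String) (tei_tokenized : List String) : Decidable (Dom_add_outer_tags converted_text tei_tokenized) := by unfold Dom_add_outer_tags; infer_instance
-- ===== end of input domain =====

-- B fuses A's two passes per list (map, then replace-first '</p><p>') into one stateful traversal; return value only, A mutates no caller data.

-- ===== PORT A =====
def aOuterTags : PySem.Dict String String :=
  PySem.Dict.ofList [("\r\n", "</p><p>"), ("\n", "</p><p>"), ("===", "<br/>"), ("~~~", "<br/>[Ornament]<br/>")]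

def aOuterTagsTei : PySem.Dict String String :=
  PySem.Dict.ofList [("\r\n", "</p><p>"), ("\n", "</p><p>"), ("===", "<pb/>"), ("~~~", "<figure>[Ornament]<figure/>")]

-- the comprehension: outer_tags[tag] if tag in outer_tags.keys() else tag
def aMapPass (d : PySem.Dict String String) (xs : List String) : List String :=
  xs.map (fun tag => if (PySem.Dict.get? d tag).isSome then (PySem.Dict.get? d tag).getD tag else tag)

-- the for-loop that overwrites the first '</p><p>' with '<p>' and breaks
def aReplaceFirst : List String → List String
  | [] => []
  | token :: rest =>
      if token = "</p><p>" then "<p>" :: rest else token :: aReplaceFirst rest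

def add_outer_tags (converted_text : List String) (tei_tokenized : List String) : List String × List String :=
  let converted_text := aMapPass aOuterTags converted_text
  let tei_tokenized := aMapPass aOuterTagsTei tei_tokenized
  (aReplaceFirst converted_text, aReplaceFirst tei_tokenized)

-- ===== PORT B =====
-- single stateful pass: mapped = mapping.get(token, token); first post-mapping '</p><p>' becomes '<p>'
def bConvert (d : PySem.Dict String String) (first_seen : Bool) : List String → List String
  | [] => []
  | token :: rest =>
      let mapped := PySem.Dict.getD d token token
      if mapped = "</p><p>" ∧ first_seen = false then
        "<p>" :: bConvert d true rest
      else
        mapped :: bConvert d first_seen rest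

def add_outer_tags_alt (converted_text : List String) (tei_tokenized : List String) : List String × List String :=
  (bConvert aOuterTags false converted_text, bConvert aOuterTagsTei false tei_tokenized)

-- ===== PRECONDITION & SPEC =====
def Spec_add_outer_tags (converted_text : List String) (tei_tokenized : List String) (out : List String × List String) : Prop := out = add_outer_tags_alt converted_text tei_tokenized
instance (converted_text : List String) (tei_tokenized : List String) (out : List String × List String) : Decidable (Spec_add_outer_tags converted_text tei_tokenized out) := by unfold Spec_add_outer_tags; infer_instance

-- ===== CLAIM (what is proved, stated in full; the proofs are below) =====
def Claim_equal_add_outer_tags : Prop := ∀ (converted_text : List String) (tei_tokenized : List String), Dom_add_outer_tags converted_text tei_tokenized → Spec_add_outer_tags converted_text tei_tokenized (add_outer_tags converted_text tei_tokenized)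

-- ===== LEMMAS AND PROOFS =====

-- the mapped token equals A's conditional form
lemma getD_eq (d : PySem.Dict String String) (x : String) :
    (if (PySem.Dict.get? d x).isSome then (PySem.Dict.get? d x).getD x else x) =
      PySem.Dict.getD d x x := by
  cases hd : PySem.Dict.get? d x <;> simp [PySem.Dict.getD, hd]

-- once the first '</p><p>' has been seen, B's pass is just the map pass
lemma bConvert_true (d : PySem.Dict String String) (xs : List String) :
    bConvert d true xs = aMapPass d xs := by
  induction xs with
  | nil => rfl
  | cons x rest ih =>
      simp only [bConvert, aMapPass, List.map, getD_eq] at *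
      rw [if_neg (by simp), ih]

-- main fusion lemma: replace-first after the map pass = one stateful pass
lemma fuse (d : PySem.Dict String String) (xs : List String) :
    aReplaceFirst (aMapPass d xs) = bConvert d false xs := by
  induction xs with
  | nil => rfl
  | cons x rest ih =>
      simp only [aMapPass, List.map, aReplaceFirst, bConvert, getD_eq] at *
      by_cases h : PySem.Dict.getD d x x = "</p><p>"
      · rw [if_pos h, if_pos ⟨h, trivial⟩, bConvert_true]
        simp [aMapPass, getD_eq]
      · rw [if_neg h, if_neg (by simp [h]), ih]

-- ===== VERDICT (by name: the statement is the Claim_ definition above) =====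
theorem add_outer_tags_spec : Claim_equal_add_outer_tags := by
  intro c t _
  show _ = _
  simp only [add_outer_tags, add_outer_tags_alt, fuse]
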